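-- pv_equiv track=rewrite | github.com/apostlez/algorithm-Exams | 2024q2/4.py | calc_s
-- ===== SOURCE A (Python) =====
-- def calc_s(start, s, t, visited = [], found = False):
--   ret = 0
--   found_l = found
--
--   if found == True:
--     if start in s:
--       return 0
--     else:
--       ret += 1
--   else:
--     if start in s:
--       ret += 1
--       found_l = True
--
--   for neighbor in reversed(t.get(start, [])):
--     if neighbor not in visited:
--       ret += calc_s(neighbor, s, t, [start] + visited, found_l)
--   return ret
-- ===== SOURCE B (Python) =====
-- def calc_s(start, s, t, visited=[], found=False):
--     sset = set(s)
--     total = 0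
--     stack = [(start, frozenset(visited), found)]
--     while stack:
--         node, path, fnd = stack.pop()
--         if fnd:
--             if node in sset:
--                 continue
--             total += 1
--         elif node in sset:
--             total += 1
--             fnd = True
--         child_path = path | {node}
--         for nb in t.get(node, []):
--             if nb not in path:
--                 stack.append((nb, child_path, fnd))
--     return total
-- ===== Notes on version B (the rewrite author's own statement) =====
-- stated objective: alternative
-- what changed: Replaces A's recursion (one call per path node, each building a copied list [start]+visited scanned linearly) by a single iterative while-loop over an explicit stack of (node, path-set, found) frames, with set membership for s and the path.
import Mathlib
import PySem

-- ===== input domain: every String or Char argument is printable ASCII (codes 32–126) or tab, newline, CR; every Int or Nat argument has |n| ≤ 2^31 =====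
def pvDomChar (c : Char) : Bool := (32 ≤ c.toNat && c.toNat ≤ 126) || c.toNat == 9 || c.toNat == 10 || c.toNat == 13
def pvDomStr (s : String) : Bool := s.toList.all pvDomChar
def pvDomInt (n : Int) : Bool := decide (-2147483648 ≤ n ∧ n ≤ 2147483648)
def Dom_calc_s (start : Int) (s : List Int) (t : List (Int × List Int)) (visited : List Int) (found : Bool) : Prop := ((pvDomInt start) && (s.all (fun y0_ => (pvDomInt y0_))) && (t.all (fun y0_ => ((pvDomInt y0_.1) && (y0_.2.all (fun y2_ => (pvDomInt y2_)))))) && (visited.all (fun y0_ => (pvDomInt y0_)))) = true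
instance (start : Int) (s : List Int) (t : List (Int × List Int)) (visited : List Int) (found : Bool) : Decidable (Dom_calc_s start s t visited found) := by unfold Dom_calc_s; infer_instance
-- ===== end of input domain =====

-- B replaces A's recursion (one call per path node, each copying [start]+visited) by a single
-- iterative worklist loop: an explicit stack of (node, path-set, found) frames popped until empty,
-- with set membership instead of list scans; same return value.

-- t.get(start, []): first-match lookup in the association list (exact: Python dicts have unique keys)
def pvLookup (t : List (Int × List Int)) (k : Int) : List Int :=
  ((t.find? (fun p => p.1 == k)).map Prod.snd).getD []

-- ===== PORT A =====
-- fuel is only a totality guard: it strictly exceeds A's maximal recursion depth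
-- (the nodes of any call path are pairwise distinct, the non-root ones values of t),
-- so it never runs out; this is proved on the way to the verdict (measure_child / measure_le).
def calcAux (fuel : Nat) (start : Int) (s : List Int) (t : List (Int × List Int)) (visited : List Int) (found : Bool) : Int :=
  match fuel with
  | 0 => 0
  | f+1 =>
    let body := fun (ret0 : Int) (found_l : Bool) =>
      ((pvLookup t start).reverse).foldl
        (fun ret nb => if nb ∈ visited then ret else ret + calcAux f nb s t (start :: visited) found_l)
        ret0
    if found then
      if start ∈ s then 0 else body 1 found
    else
      if start ∈ s then body 1 true else body 0 found

def calc_s (start : Int) (s : List Int) (t : List (Int × List Int)) (visited : List Int) (found : Bool) : Int :=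
  calcAux (2 * (t.flatMap (fun p => p.2)).length + 2) start s t visited found

-- ===== PORT B =====
-- Python B's while-loop over an explicit stack (head = top); one pop per iteration.
-- `path | {node}` (a frozenset union with a singleton) is PySem.Set.add, exact as a set.
-- fuel is only a totality guard (Python's loop needs none): costA below counts the exact
-- number of pops the loop performs, so the fuel never runs out.
def runB (fuel : Nat) (sset : PySem.Set Int) (t : List (Int × List Int)) (stack : List (Int × PySem.Set Int × Bool)) (acc : Int) : Int :=
  match fuel, stack with
  | 0, _ => acc
  | _+1, [] => acc
  | f+1, (node, path, fnd) :: rest =>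
    if fnd && PySem.Set.contains sset node then
      runB f sset t rest acc
    else
      let fnd' := fnd || PySem.Set.contains sset node
      let acc' := if fnd' then acc + 1 else acc
      let frames := ((pvLookup t node).filter (fun nb => !PySem.Set.contains path nb)).map
        (fun nb => (nb, PySem.Set.add path node, fnd'))
      runB f sset t (frames.reverse ++ rest) acc'

-- pop count of the loop started on one frame (fuel bound for runB; totality guard only)
def costA (fuel : Nat) (node : Int) (s : List Int) (t : List (Int × List Int)) (visited : List Int) (fnd : Bool) : Nat :=
  match fuel with
  | 0 => 0
  | f+1 =>
    if fnd && decide (node ∈ s) then 1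
    else 1 + (((pvLookup t node).filter (fun nb => !decide (nb ∈ visited))).map
      (fun nb => costA f nb s t (node :: visited) (fnd || decide (node ∈ s)))).sum

def calc_s_alt (start : Int) (s : List Int) (t : List (Int × List Int)) (visited : List Int) (found : Bool) : Int :=
  runB (costA (2 * (t.flatMap (fun p => p.2)).length + 2) start s t visited found)
    (PySem.Set.ofList s) t [(start, PySem.Set.ofList visited, found)] 0

-- ===== PRECONDITION & SPEC =====
def Spec_calc_s (start : Int) (s : List Int) (t : List (Int × List Int)) (visited : List Int) (found : Bool) (out : Int) : Prop := out = calc_s_alt start s t visited found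
instance (start : Int) (s : List Int) (t : List (Int × List Int)) (visited : List Int) (found : Bool) (out : Int) : Decidable (Spec_calc_s start s t visited found out) := by unfold Spec_calc_s; infer_instance

-- ===== CLAIM (what is proved, stated in full; the proofs are below) =====
def Claim_equal_calc_s : Prop := ∀ (start : Int) (s : List Int) (t : List (Int × List Int)) (visited : List Int) (found : Bool), Dom_calc_s start s t visited found → Spec_calc_s start s t visited found (calc_s start s t visited found)

-- ===== LEMMAS AND PROOFS =====

-- termination measure of a call (node, visited): twice the number of t-values still usable, plus
-- a one-step slack for a node not yet on its own path; strictly decreases to every child call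
def measureM (t : List (Int × List Int)) (node : Int) (visited : List Int) : Nat :=
  2 * ((t.flatMap (fun p => p.2)).toFinset \ insert node visited.toFinset).card +
    (if node ∈ visited then 1 else 2)

theorem measure_pos (t : List (Int × List Int)) (node : Int) (visited : List Int) :
    1 ≤ measureM t node visited := by
  unfold measureM; split <;> omega

theorem measure_le (t : List (Int × List Int)) (node : Int) (visited : List Int) :
    measureM t node visited ≤ 2 * (t.flatMap (fun p => p.2)).length + 2 := by
  unfold measureM
  have h1 : ((t.flatMap (fun p => p.2)).toFinset \ insert node visited.toFinset).card
      ≤ (t.flatMap (fun p => p.2)).toFinset.card := Finset.card_le_card Finset.sdiff_subset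
  have h2 : (t.flatMap (fun p => p.2)).toFinset.card ≤ (t.flatMap (fun p => p.2)).length :=
    List.toFinset_card_le _
  split <;> omega

theorem measure_child (t : List (Int × List Int)) (node nb : Int) (visited : List Int)
    (hU : nb ∈ t.flatMap (fun p => p.2)) (hv : nb ∉ visited) :
    measureM t nb (node :: visited) < measureM t node visited := by
  unfold measureM
  by_cases hnn : nb = node
  · subst hnn
    simp only [List.toFinset_cons, Finset.insert_idem, List.mem_cons, true_or, if_true]
    rw [if_neg hv]
    omega
  · have hmemd : nb ∈ (t.flatMap (fun p => p.2)).toFinset \ insert node visited.toFinset := by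
      rw [Finset.mem_sdiff, Finset.mem_insert, List.mem_toFinset, List.mem_toFinset]
      exact ⟨hU, by tauto⟩
    have hcard : 1 ≤ ((t.flatMap (fun p => p.2)).toFinset \ insert node visited.toFinset).card :=
      Finset.card_pos.mpr ⟨nb, hmemd⟩
    have hchild : ((t.flatMap (fun p => p.2)).toFinset \ insert nb (insert node visited.toFinset)).card
        = ((t.flatMap (fun p => p.2)).toFinset \ insert node visited.toFinset).card - 1 := by
      rw [Finset.sdiff_insert, Finset.card_erase_of_mem hmemd]
    have hnbc : nb ∉ node :: visited := by
      rw [List.mem_cons]; tauto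
    simp only [List.toFinset_cons]
    rw [hchild, if_neg hnbc]
    split <;> omega

theorem pvLookup_subset (t : List (Int × List Int)) (k x : Int) (hx : x ∈ pvLookup t k) :
    x ∈ t.flatMap (fun p => p.2) := by
  unfold pvLookup at hx
  cases h : t.find? (fun p => p.1 == k) with
  | none => rw [h] at hx; simp at hx
  | some p =>
    rw [h] at hx; simp at hx
    exact List.mem_flatMap.mpr ⟨p, List.mem_of_find?_eq_some h, hx⟩

-- A's guarded loop is the sum over the kept neighbours
theorem foldl_guard_filter (g : Int → Int) (visited : List Int) (l : List Int) : ∀ init : Int,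
    l.foldl (fun a b => if b ∈ visited then a else a + g b) init
      = init + ((l.filter (fun b => !decide (b ∈ visited))).map g).sum := by
  induction l with
  | nil => simp
  | cons x xs ih =>
    intro init
    by_cases hx : x ∈ visited
    · simp [List.foldl_cons, hx, ih]
    · simp [List.foldl_cons, hx, ih]
      ring

-- key simulation: popping one frame whose path set has the members of A's visited list
-- consumes exactly its pop count of fuel and adds exactly A's value to the accumulator
theorem runB_pop (s : List Int) (t : List (Int × List Int)) (n : Nat) :
    ∀ (node : Int) (fnd : Bool) (vis : PySem.Set Int) (visited : List Int)
      (rest : List (Int × PySem.Set Int × Bool)) (acc : Int) (f : Nat),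
    (∀ x : Int, x ∈ vis ↔ x ∈ visited) → measureM t node visited ≤ n →
    runB (costA n node s t visited fnd + f) (PySem.Set.ofList s) t ((node, vis, fnd) :: rest) acc
      = runB f (PySem.Set.ofList s) t rest (acc + calcAux n node s t visited fnd) := by
  induction n with
  | zero =>
    intro node fnd vis visited rest acc f _ hm
    exact absurd hm (by have := measure_pos t node visited; omega)
  | succ n ih =>
    intro node fnd vis visited rest acc f hmem hm
    have hc : PySem.Set.contains (PySem.Set.ofList s) node = decide (node ∈ s) := by
      rw [Bool.eq_iff_iff]
      simp [PySem.Set.contains_iff, PySem.Set.mem_ofList]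
    have hcv : ∀ nb : Int, PySem.Set.contains vis nb = decide (nb ∈ visited) := by
      intro nb
      rw [Bool.eq_iff_iff]
      simp [PySem.Set.contains_iff, hmem nb]
    have hinv' : ∀ x : Int, x ∈ PySem.Set.add vis node ↔ x ∈ node :: visited := by
      intro x
      rw [PySem.Set.mem_add, List.mem_cons, hmem x]
      tauto
    -- the worklist processes a block of child frames one after the other
    have laux : ∀ (l : List Int), (∀ nb ∈ l, nb ∈ t.flatMap (fun p => p.2) ∧ nb ∉ visited) →
        ∀ (fnd' : Bool) (rest : List (Int × PySem.Set Int × Bool)) (acc : Int) (f : Nat),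
        runB ((l.map (fun nb => costA n nb s t (node :: visited) fnd')).sum + f)
            (PySem.Set.ofList s) t
            (l.map (fun nb => (nb, PySem.Set.add vis node, fnd')) ++ rest) acc
          = runB f (PySem.Set.ofList s) t rest
              (acc + (l.map (fun nb => calcAux n nb s t (node :: visited) fnd')).sum) := by
      intro l
      induction l with
      | nil => intro _ fnd' rest acc f; simp
      | cons nb l ihl =>
        intro hl fnd' rest acc f
        have hnb := hl nb (List.mem_cons_self ..)
        have hmnb : measureM t nb (node :: visited) ≤ n := by
          have := measure_child t node nb visited hnb.1 hnb.2; omega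
        simp only [List.map_cons, List.sum_cons, List.cons_append]
        rw [Nat.add_assoc,
          ih nb fnd' (PySem.Set.add vis node) (node :: visited) _ acc _ hinv' hmnb,
          ihl (fun x hx => hl x (List.mem_cons_of_mem nb hx)) fnd' rest _ f,
          add_assoc]
    by_cases hstop : fnd = true ∧ node ∈ s
    · have h1 : costA (n+1) node s t visited fnd = 1 := by
        simp [costA, hstop.1, hstop.2]
      have h2 : calcAux (n+1) node s t visited fnd = 0 := by
        simp [calcAux, hstop.1, hstop.2]
      rw [h1, h2, Nat.add_comm 1 f]
      simp [runB, hc, hstop.1, hstop.2]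
    · -- push branch
      have hstopb : (fnd && decide (node ∈ s)) = false := by
        rcases Bool.eq_false_or_eq_true fnd with h | h <;> by_cases hns : node ∈ s <;>
          simp_all
      have hfilter : ((pvLookup t node).filter (fun nb => !PySem.Set.contains vis nb))
          = ((pvLookup t node).filter (fun nb => !decide (nb ∈ visited))) :=
        List.filter_congr (fun nb _ => by rw [hcv nb])
      have hcost : costA (n+1) node s t visited fnd
          = 1 + (((pvLookup t node).filter (fun nb => !decide (nb ∈ visited))).map
              (fun nb => costA n nb s t (node :: visited) (fnd || decide (node ∈ s)))).sum := by
        simp [costA, hstopb]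
      have hbody : ∀ (ret0 : Int) (fl : Bool),
          ((pvLookup t node).reverse).foldl
            (fun ret nb => if nb ∈ visited then ret else ret + calcAux n nb s t (node :: visited) fl) ret0
          = ret0 + ((((pvLookup t node).filter (fun nb => !decide (nb ∈ visited))).reverse).map
              (fun nb => calcAux n nb s t (node :: visited) fl)).sum := by
        intro ret0 fl
        rw [foldl_guard_filter, List.filter_reverse]
      have hcalc : calcAux (n+1) node s t visited fnd
          = (if (fnd || decide (node ∈ s)) then (1:Int) else 0)
            + ((((pvLookup t node).filter (fun nb => !decide (nb ∈ visited))).reverse).map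
                (fun nb => calcAux n nb s t (node :: visited) (fnd || decide (node ∈ s)))).sum := by
        rcases Bool.eq_false_or_eq_true fnd with h | h <;> subst h
        · by_cases hns : node ∈ s
          · exact absurd ⟨rfl, hns⟩ hstop
          · simp only [calcAux, if_true, if_neg hns, hns, decide_false, Bool.or_false]
            rw [hbody]
            simp
        · by_cases hns : node ∈ s
          · simp only [calcAux, Bool.false_eq_true, if_false, if_pos hns, hns, decide_true,
              Bool.false_or, if_true]
            rw [hbody]
          · simp only [calcAux, Bool.false_eq_true, if_false, if_neg hns, hns, decide_false,
              Bool.false_or]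
            rw [hbody]
      rw [hcost,
        show 1 + (((pvLookup t node).filter (fun nb => !decide (nb ∈ visited))).map
            (fun nb => costA n nb s t (node :: visited) (fnd || decide (node ∈ s)))).sum + f
          = ((((pvLookup t node).filter (fun nb => !decide (nb ∈ visited))).map
            (fun nb => costA n nb s t (node :: visited) (fnd || decide (node ∈ s)))).sum + f) + 1
          by omega]
      simp only [runB, hc, hstopb, Bool.false_eq_true, if_neg, ite_false, hfilter]
      rw [← List.map_reverse,
        show (((pvLookup t node).filter (fun nb => !decide (nb ∈ visited))).map
            (fun nb => costA n nb s t (node :: visited) (fnd || decide (node ∈ s)))).sum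
          = ((((pvLookup t node).filter (fun nb => !decide (nb ∈ visited))).reverse).map
            (fun nb => costA n nb s t (node :: visited) (fnd || decide (node ∈ s)))).sum
          by rw [List.map_reverse, List.sum_reverse]]
      rw [laux (((pvLookup t node).filter (fun nb => !decide (nb ∈ visited))).reverse)
        (fun nb hnb => by
          rw [List.mem_reverse, List.mem_filter] at hnb
          exact ⟨pvLookup_subset t node nb hnb.1, by simpa using hnb.2⟩)
        (fnd || decide (node ∈ s)) rest _ f]
      rw [hcalc]
      rcases Bool.eq_false_or_eq_true (fnd || decide (node ∈ s)) with h | h <;>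
        simp [h] <;> ring

-- ===== VERDICT (by name: the statement is the Claim_ definition above) =====
theorem calc_s_spec : Claim_equal_calc_s := by
  intro start s t visited found _
  unfold Spec_calc_s calc_s calc_s_alt
  have h := runB_pop s t (2 * (t.flatMap (fun p => p.2)).length + 2) start found
    (PySem.Set.ofList visited) visited [] 0 0
    (fun x => PySem.Set.mem_ofList visited x) (measure_le t start visited)
  simpa [runB] using h.symm
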